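-- pv_equiv track=rewrite | github.com/alehuuh/img-stenography | image_stenography.py | is_valid_message
-- ===== SOURCE A (Python) =====
-- def is_valid_message(message):
--     if 10 <= len(message) <= 1000:
--         for x in range(0, len(message)):
--             if not chr(32) <= message[x] <= chr(126):
--                 return False
--             else:
--                 x += 1
--         return True
--     else:
--         return False
-- ===== SOURCE B (Python) =====
-- def is_valid_message(message):
--     if not (10 <= len(message) <= 1000):
--         return False
--     return chr(32) <= min(message) and max(message) <= chr(126)
-- ===== Notes on version B (the rewrite author's own statement) =====
-- stated objective: idiomatic
-- what changed: Replaces the index loop with per-char early return by two aggregate reductions: compare min(message) and max(message) against the printable-ASCII bounds after the length guard.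
import Mathlib
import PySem

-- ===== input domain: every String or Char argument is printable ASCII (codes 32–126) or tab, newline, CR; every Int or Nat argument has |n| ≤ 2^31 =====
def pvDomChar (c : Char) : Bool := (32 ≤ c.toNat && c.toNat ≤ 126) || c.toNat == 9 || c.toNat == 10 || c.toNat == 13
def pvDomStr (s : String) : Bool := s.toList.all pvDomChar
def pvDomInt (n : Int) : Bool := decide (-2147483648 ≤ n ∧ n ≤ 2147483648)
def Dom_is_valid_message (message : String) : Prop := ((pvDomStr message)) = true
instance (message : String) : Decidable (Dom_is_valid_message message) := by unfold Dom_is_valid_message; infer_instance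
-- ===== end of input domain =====

-- B replaces A's per-index loop with early return by two aggregate reductions
-- (min and max over the characters) compared against the printable-ASCII bounds (idiomatic).


-- ===== PORT A =====
-- A's for-loop over indices with early `return False`, transliterated as a
-- recursion over the remaining characters in order.
def pvALoop (cs : List Char) : Bool :=
  match cs with
  | [] => true
  | c :: rest =>
    if ¬ (Char.ofNat 32 ≤ c ∧ c ≤ Char.ofNat 126) then false
    else pvALoop rest

def is_valid_message (message : String) : Bool :=
  if 10 ≤ message.toList.length ∧ message.toList.length ≤ 1000 then pvALoop message.toList
  else false

-- ===== PORT B =====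
-- min/max over a nonempty string = fold of min/max over its characters.
def is_valid_message_alt (message : String) : Bool :=
  if ¬ (10 ≤ message.toList.length ∧ message.toList.length ≤ 1000) then false
  else
    match message.toList with
    | [] => false  -- unreachable: length ≥ 10
    | c :: rest =>
      decide (Char.ofNat 32 ≤ rest.foldl min c) && decide (rest.foldl max c ≤ Char.ofNat 126)

-- ===== PRECONDITION & SPEC =====
def Spec_is_valid_message (message : String) (out : Bool) : Prop := out = is_valid_message_alt message
instance (message : String) (out : Bool) : Decidable (Spec_is_valid_message message out) := by unfold Spec_is_valid_message; infer_instance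

-- ===== CLAIM (what is proved, stated in full; the proofs are below) =====
def Claim_equal_is_valid_message : Prop := ∀ (message : String), Dom_is_valid_message message → Spec_is_valid_message message (is_valid_message message)

-- ===== LEMMAS AND PROOFS =====

theorem pvALoop_eq_all (cs : List Char) :
    pvALoop cs = cs.all (fun c => decide (Char.ofNat 32 ≤ c ∧ c ≤ Char.ofNat 126)) := by
  induction cs with
  | nil => rfl
  | cons c rest ih =>
    simp only [pvALoop, List.all_cons, ih]
    by_cases h : Char.ofNat 32 ≤ c ∧ c ≤ Char.ofNat 126 <;> simp [h]

theorem le_foldl_min (lo c : Char) (rest : List Char) :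
    (lo ≤ rest.foldl min c) ↔ (lo ≤ c ∧ ∀ x ∈ rest, lo ≤ x) := by
  induction rest generalizing c with
  | nil => simp
  | cons h t ih =>
    simp only [List.foldl_cons, ih, le_min_iff, List.mem_cons]
    constructor
    · rintro ⟨⟨hc, hh⟩, ht⟩
      exact ⟨hc, fun x hx => by rcases hx with rfl | hx; exact hh; exact ht x hx⟩
    · rintro ⟨hc, ht⟩
      exact ⟨⟨hc, ht h (Or.inl rfl)⟩, fun x hx => ht x (Or.inr hx)⟩

theorem foldl_max_le (hi c : Char) (rest : List Char) :
    (rest.foldl max c ≤ hi) ↔ (c ≤ hi ∧ ∀ x ∈ rest, x ≤ hi) := by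
  induction rest generalizing c with
  | nil => simp
  | cons h t ih =>
    simp only [List.foldl_cons, ih, max_le_iff, List.mem_cons]
    constructor
    · rintro ⟨⟨hc, hh⟩, ht⟩
      exact ⟨hc, fun x hx => by rcases hx with rfl | hx; exact hh; exact ht x hx⟩
    · rintro ⟨hc, ht⟩
      exact ⟨⟨hc, ht h (Or.inl rfl)⟩, fun x hx => ht x (Or.inr hx)⟩

theorem pvKey (c : Char) (rest : List Char) :
    pvALoop (c :: rest) =
      (decide (Char.ofNat 32 ≤ rest.foldl min c) && decide (rest.foldl max c ≤ Char.ofNat 126)) := by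
  apply Bool.eq_iff_iff.mpr
  rw [pvALoop_eq_all]
  simp only [Bool.and_eq_true, decide_eq_true_eq, List.all_cons, List.all_eq_true,
    le_foldl_min, foldl_max_le]
  exact ⟨fun ⟨⟨h1, h2⟩, h3⟩ => ⟨⟨h1, fun x hx => (h3 x hx).1⟩, h2, fun x hx => (h3 x hx).2⟩,
    fun ⟨⟨h1, h2⟩, h3, h4⟩ => ⟨⟨h1, h3⟩, fun x hx => ⟨h2 x hx, h4 x hx⟩⟩⟩

-- ===== VERDICT (by name: the statement is the Claim_ definition above) =====
theorem is_valid_message_spec : Claim_equal_is_valid_message := by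
  intro message _
  unfold Spec_is_valid_message is_valid_message is_valid_message_alt
  by_cases hlen : 10 ≤ message.toList.length ∧ message.toList.length ≤ 1000
  · rw [if_pos hlen, if_neg (not_not_intro hlen)]
    cases hcs : message.toList with
    | nil => rw [hcs] at hlen; simp at hlen
    | cons c rest => exact pvKey c rest
  · rw [if_neg hlen, if_pos hlen]
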